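-- pv_equiv track=rewrite | github.com/JasperGuo/Unimer | grammars/geo/geo_normalization.py | tokenize_prolog
-- ===== SOURCE A (Python) =====
-- def tokenize_prolog(logical_form):
--     # Tokenize Prolog
--     normalized_lf = logical_form.replace(" ", "::")
--     replacements = [
--         ('(', ' ( '),
--         (')', ' ) '),
--         (',', ' , '),
--         ("\\+", " \\+ "),
--     ]
--     for a, b in replacements:
--         normalized_lf = normalized_lf.replace(a, b)
--     toks = [t if "::" not in t else t.replace(
--         "::", " ") for t in normalized_lf.split()]
--     return toks
-- ===== SOURCE B (Python) =====
-- def tokenize_prolog(logical_form):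
--     # One left-to-right scan with a token buffer: '(' ')' ',' and '\+' are
--     # emitted as their own tokens; whitespace other than ' ' ends a token
--     # (plain spaces stay inside tokens so quoted multi-word names survive).
--     tokens = []
--     buf = []
--
--     def flush():
--         if buf:
--             tokens.append("".join(buf))
--             buf.clear()
--
--     i = 0
--     n = len(logical_form)
--     while i < n:
--         c = logical_form[i]
--         if c == "\\" and i + 1 < n and logical_form[i + 1] == "+":
--             flush()
--             tokens.append("\\+")
--             i += 2
--             continue
--         if c in "(),":
--             flush()
--             tokens.append(c)
--         elif c.isspace() and c != " ":
--             flush()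
--         else:
--             buf.append(c)
--         i += 1
--     flush()
--     return tokens
-- ===== Notes on version B (the rewrite author's own statement) =====
-- stated objective: alternative
-- what changed: Replaces the five whole-string replace passes plus split plus per-token '::' decode by a single left-to-right character scan with a running token buffer that flushes at delimiters and at non-space whitespace.
-- intended difference: On inputs where a colon is immediately followed by another colon or by a space, the placeholder encoding A uses for spaces misfires and A turns each such adjacent colon pair into a single space inside the token; B keeps the token's characters unchanged, which is the intended tokenization. — e.g. on tokenize_prolog("a::b"): A returns ["a b"], B returns ["a::b"]
import Mathlib
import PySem

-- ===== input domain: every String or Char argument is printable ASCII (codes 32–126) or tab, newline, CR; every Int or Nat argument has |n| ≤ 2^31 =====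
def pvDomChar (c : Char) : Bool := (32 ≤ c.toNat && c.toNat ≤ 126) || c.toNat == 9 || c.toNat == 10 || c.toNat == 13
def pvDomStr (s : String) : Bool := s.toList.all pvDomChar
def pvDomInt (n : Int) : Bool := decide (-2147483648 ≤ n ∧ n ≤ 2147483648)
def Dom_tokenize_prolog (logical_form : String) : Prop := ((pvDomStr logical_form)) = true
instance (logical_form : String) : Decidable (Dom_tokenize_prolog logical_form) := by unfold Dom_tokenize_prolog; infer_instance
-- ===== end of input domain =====

-- B replaces A's five whole-string replace passes + split + per-token '::' decode by a single
-- left-to-right character scan with a running token buffer (same cost class; B is the natural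
-- one-pass tokenizer, and it differs from A exactly on the D_ inputs stated below).

-- ===== PORT A =====
def tokenize_prolog (logical_form : String) : List String :=
  let normalized_lf := PySem.Str.replace logical_form " " "::"
  let replacements : List (String × String) :=
    [("(", " ( "), (")", " ) "), (",", " , "), ("\\+", " \\+ ")]
  let normalized_lf := replacements.foldl (fun acc p => PySem.Str.replace acc p.1 p.2) normalized_lf
  (PySem.Str.split₀ normalized_lf).map
    (fun t => if PySem.Str.isIn "::" t then PySem.Str.replace t "::" " " else t)

-- ===== PORT B =====
-- helper: flush() — append the buffer as a token if it is non-empty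
def pvFlushB (buf : List Char) (toks : List String) : List String :=
  if buf = [] then toks else toks ++ [String.ofList buf]

-- the while loop over the characters (two-character lookahead for "\+")
def pvScanB : List Char → List Char → List String → List String
  | [], buf, toks => pvFlushB buf toks
  | '\\' :: '+' :: t, buf, toks => pvScanB t [] (pvFlushB buf toks ++ ["\\+"])
  | c :: t, buf, toks =>
    if c = '(' ∨ c = ')' ∨ c = ',' then
      pvScanB t [] (pvFlushB buf toks ++ [String.ofList [c]])
    else if PySem.Chars.isspace c ∧ c ≠ ' ' then
      pvScanB t [] (pvFlushB buf toks)
    else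
      pvScanB t (buf ++ [c]) toks

def tokenize_prolog_alt (logical_form : String) : List String :=
  pvScanB logical_form.toList [] []

-- ===== PRECONDITION & SPEC =====
-- On inputs where a colon is immediately followed by another colon or by a space, the placeholder
-- encoding A uses for spaces misfires and A turns each such adjacent colon pair into a single
-- space inside the token; B keeps the token's characters unchanged (intended tokenization).
def D_tokenize_prolog (logical_form : String) : Prop :=
  PySem.Str.isIn "::" logical_form = true ∨ PySem.Str.isIn ": " logical_form = true
instance (logical_form : String) : Decidable (D_tokenize_prolog logical_form) := by
  unfold D_tokenize_prolog; infer_instance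

def Spec_tokenize_prolog (logical_form : String) (out : List String) : Prop :=
  ¬ D_tokenize_prolog logical_form → out = tokenize_prolog_alt logical_form
instance (logical_form : String) (out : List String) : Decidable (Spec_tokenize_prolog logical_form out) := by
  unfold Spec_tokenize_prolog; infer_instance

def pvDiffWitness_tokenize_prolog : String := "a::b"
def pvDiffWitnessOut_tokenize_prolog : (List String) × (List String) := (["a b"], ["a::b"])

-- ===== CLAIM (what is proved, stated in full; the proofs are below) =====
def Claim_unchanged_tokenize_prolog : Prop :=
  ∀ (logical_form : String), Dom_tokenize_prolog logical_form →
    Spec_tokenize_prolog logical_form (tokenize_prolog logical_form)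
def Claim_changed_tokenize_prolog : Prop :=
  Dom_tokenize_prolog (pvDiffWitness_tokenize_prolog) ∧
  D_tokenize_prolog (pvDiffWitness_tokenize_prolog) ∧
  tokenize_prolog (pvDiffWitness_tokenize_prolog) = pvDiffWitnessOut_tokenize_prolog.1 ∧
  tokenize_prolog_alt (pvDiffWitness_tokenize_prolog) = pvDiffWitnessOut_tokenize_prolog.2 ∧
  pvDiffWitnessOut_tokenize_prolog.1 ≠ pvDiffWitnessOut_tokenize_prolog.2
def Claim_exact_tokenize_prolog : Prop :=
  ∀ (logical_form : String), Dom_tokenize_prolog logical_form →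
    D_tokenize_prolog logical_form →
      tokenize_prolog logical_form ≠ tokenize_prolog_alt logical_form

-- ===== LEMMAS AND PROOFS =====

-- accumulator-free form of PySem.Chars.replace.go
def pvRepF (old new : List Char) : Nat → List Char → List Char
  | 0, l => l
  | _ + 1, [] => []
  | fuel + 1, c :: t =>
    if old.isPrefixOf (c :: t) then new ++ pvRepF old new fuel (List.drop old.length (c :: t))
    else c :: pvRepF old new fuel t

theorem pvRepF_nil (old new : List Char) (fuel : Nat) : pvRepF old new fuel [] = [] := by
  cases fuel <;> rfl

theorem pv_go_eq (old new : List Char) (fuel : Nat) :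
    ∀ (l acc : List Char),
      PySem.Chars.replace.go old new fuel l acc = acc.reverse ++ pvRepF old new fuel l := by
  induction fuel with
  | zero => intro l acc; simp [PySem.Chars.replace.go, pvRepF]
  | succ n ih =>
    intro l acc
    cases l with
    | nil => simp [PySem.Chars.replace.go, pvRepF]
    | cons c t =>
      rw [PySem.Chars.replace.go]
      by_cases h : old.isPrefixOf (c :: t) <;> simp [h, pvRepF, ih]

theorem pv_replace_eq (l old new : List Char) (h : old ≠ []) :
    PySem.Chars.replace l old new = pvRepF old new l.length l := by
  unfold PySem.Chars.replace
  simp [List.isEmpty_iff, h, pv_go_eq]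

theorem pvRepF_single (a : Char) (new : List Char) :
    ∀ (fuel : Nat) (l : List Char), l.length ≤ fuel →
      pvRepF [a] new fuel l = l.flatMap (fun c => if c = a then new else [c]) := by
  intro fuel
  induction fuel with
  | zero => intro l hl; simp at hl; simp [hl, pvRepF]
  | succ n ih =>
    intro l hl
    cases l with
    | nil => simp [pvRepF]
    | cons c t =>
      simp at hl
      by_cases h : c = a
      · subst h
        simp [pvRepF, List.isPrefixOf, ih t hl]
      · rw [pvRepF, if_neg (by simp [List.isPrefixOf]; intro hh; exact h hh.symm)]
        simp [h, ih t hl]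

-- left-to-right replacement of "\+" by " \+ ", as a two-character scan
def pvRepBP : List Char → List Char
  | [] => []
  | [c] => [c]
  | c :: d :: t =>
    if c = '\\' ∧ d = '+' then ' ' :: '\\' :: '+' :: ' ' :: pvRepBP t
    else c :: pvRepBP (d :: t)

theorem pvRepF_bp :
    ∀ (fuel : Nat) (l : List Char), l.length ≤ fuel →
      pvRepF ['\\', '+'] [' ', '\\', '+', ' '] fuel l = pvRepBP l := by
  intro fuel
  induction fuel with
  | zero => intro l hl; simp at hl; simp [hl, pvRepF, pvRepBP]
  | succ n ih =>
    intro l hl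
    match l with
    | [] => simp [pvRepF, pvRepBP]
    | [c] =>
      simp [pvRepF, pvRepBP, List.isPrefixOf, pvRepF_nil]
    | c :: d :: t =>
      simp at hl
      by_cases h : c = '\\' ∧ d = '+'
      · obtain ⟨h1, h2⟩ := h; subst h1; subst h2
        simp [pvRepF, pvRepBP, List.isPrefixOf, ih t (by omega)]
      · rw [pvRepF, if_neg (by simp [List.isPrefixOf]; intro h1 h2; exact h ⟨h1.symm, h2.symm⟩)]
        rw [pvRepBP, if_neg h]
        rw [ih (d :: t) (by simp; omega)]

-- left-to-right replacement of "::" by " ", as a two-character scan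
def pvDecG : List Char → List Char
  | [] => []
  | [c] => [c]
  | c :: d :: t =>
    if c = ':' ∧ d = ':' then ' ' :: pvDecG t
    else c :: pvDecG (d :: t)

theorem pvRepF_colon :
    ∀ (fuel : Nat) (l : List Char), l.length ≤ fuel →
      pvRepF [':', ':'] [' '] fuel l = pvDecG l := by
  intro fuel
  induction fuel with
  | zero => intro l hl; simp at hl; simp [hl, pvRepF, pvDecG]
  | succ n ih =>
    intro l hl
    match l with
    | [] => simp [pvRepF, pvDecG]
    | [c] => simp [pvRepF, pvDecG, List.isPrefixOf, pvRepF_nil]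
    | c :: d :: t =>
      simp at hl
      by_cases h : c = ':' ∧ d = ':'
      · obtain ⟨h1, h2⟩ := h; subst h1; subst h2
        simp [pvRepF, pvDecG, List.isPrefixOf, ih t (by omega)]
      · rw [pvRepF, if_neg (by simp [List.isPrefixOf]; intro h1 h2; exact h ⟨h1.symm, h2.symm⟩)]
        rw [pvDecG, if_neg h]
        rw [ih (d :: t) (by simp; omega)]

theorem pvRepF_id (old new : List Char) (hne : old ≠ []) :
    ∀ (fuel : Nat) (l : List Char), l.length ≤ fuel → ¬ (old <:+: l) →
      pvRepF old new fuel l = l := by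
  intro fuel
  induction fuel with
  | zero => intro l hl _; simp at hl; simp [hl, pvRepF]
  | succ n ih =>
    intro l hl hinf
    cases l with
    | nil => simp [pvRepF]
    | cons c t =>
      simp at hl
      rw [pvRepF, if_neg (fun hp => hinf (List.isPrefixOf_iff_prefix.mp hp).isInfix)]
      rw [ih t hl (fun h => hinf (List.infix_cons h))]

-- the combined effect of the four single-character replacements
def pvE4 (c : Char) : List Char :=
  if c = ' ' then [':', ':']
  else if c = '(' then [' ', '(', ' ']
  else if c = ')' then [' ', ')', ' ']
  else if c = ',' then [' ', ',', ' ']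
  else [c]

-- the combined effect of all five replacement passes
def pvExpand : List Char → List Char
  | [] => []
  | [c] => pvE4 c
  | c :: d :: t =>
    if c = '\\' ∧ d = '+' then ' ' :: '\\' :: '+' :: ' ' :: pvExpand t
    else pvE4 c ++ pvExpand (d :: t)

-- accumulator-free form of PySem.Chars.split₀.go
def pvSplitW : List Char → List Char → List (List Char)
  | [], cur => if cur = [] then [] else [cur]
  | c :: rest, cur =>
    if PySem.Chars.isspace c then
      (if cur = [] then [] else [cur]) ++ pvSplitW rest []
    else pvSplitW rest (cur ++ [c])

theorem pv_split_go_eq :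
    ∀ (l cur : List Char) (acc : List (List Char)),
      PySem.Chars.split₀.go l cur acc = acc.reverse ++ pvSplitW l cur.reverse := by
  intro l
  induction l with
  | nil =>
    intro cur acc
    by_cases h : cur = [] <;> simp [PySem.Chars.split₀.go, pvSplitW, h, List.isEmpty_iff]
  | cons c rest ih =>
    intro cur acc
    rw [PySem.Chars.split₀.go]
    by_cases hs : PySem.Chars.isspace c
    · by_cases h : cur = [] <;>
        simp [hs, h, List.isEmpty_iff, ih, pvSplitW]
    · simp [hs, ih, pvSplitW]

theorem pv_split₀_eq (l : List Char) : PySem.Chars.split₀ l = pvSplitW l [] := by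
  unfold PySem.Chars.split₀
  simpa using pv_split_go_eq l [] []

-- per-token decoding used on A's side
def pvDec (l : List Char) : String :=
  String.ofList (PySem.Chars.replace l [':', ':'] [' '])

theorem pvDec_eq_decG (l : List Char) : pvDec l = String.ofList (pvDecG l) := by
  unfold pvDec
  rw [pv_replace_eq l [':', ':'] [' '] (by simp), pvRepF_colon _ _ le_rfl]

theorem pv_splitW_space {c : Char} (h : PySem.Chars.isspace c = true) (rest cur : List Char) :
    pvSplitW (c :: rest) cur = (if cur = [] then [] else [cur]) ++ pvSplitW rest [] := by
  simp [pvSplitW, h]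

theorem pv_splitW_nonspace {c : Char} (h : PySem.Chars.isspace c = false) (rest cur : List Char) :
    pvSplitW (c :: rest) cur = pvSplitW rest (cur ++ [c]) := by
  simp [pvSplitW, h]

theorem pvExpand_cons_not_bs {c : Char} (h : c ≠ '\\') (t : List Char) :
    pvExpand (c :: t) = pvE4 c ++ pvExpand t := by
  cases t with
  | nil => simp [pvExpand]
  | cons d t' => rw [pvExpand, if_neg (fun hc => h hc.1)]

theorem pvExpand_cons_bs_not_plus {t : List Char} (h : t.head? ≠ some '+') :
    pvExpand ('\\' :: t) = '\\' :: pvExpand t := by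
  cases t with
  | nil => simp [pvExpand, pvE4]
  | cons d t' =>
    rw [pvExpand, if_neg (fun hc => h (by simp [hc.2]))]
    simp [pvE4]

-- "no colon is directly followed by a colon or a space"
def pvOK : List Char → Prop
  | [] => True
  | [_] => True
  | c :: d :: t => ¬ (c = ':' ∧ (d = ':' ∨ d = ' ')) ∧ pvOK (d :: t)

theorem pvOK_tail {c : Char} {l : List Char} (h : pvOK (c :: l)) : pvOK l := by
  cases l with
  | nil => trivial
  | cons d t => exact h.2

theorem pvOK_append_left : ∀ (l1 l2 : List Char), pvOK (l1 ++ l2) → pvOK l1 := by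
  intro l1
  induction l1 with
  | nil => intro _ _; trivial
  | cons c t ih =>
    intro l2 h
    cases t with
    | nil => trivial
    | cons d t' => exact ⟨h.1, ih l2 h.2⟩

theorem pvOK_suffix : ∀ (l1 l2 : List Char), pvOK (l1 ++ l2) → pvOK l2 := by
  intro l1
  induction l1 with
  | nil => intro l2 h; simpa using h
  | cons c t ih => intro l2 h; exact ih l2 (pvOK_tail h)

theorem pvOK_of_not_infix :
    ∀ (l : List Char), ¬ ([':', ':'] <:+: l) → ¬ ([':', ' '] <:+: l) → pvOK l := by
  intro l
  induction l with
  | nil => intro _ _; trivial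
  | cons c t ih =>
    intro h1 h2
    cases t with
    | nil => trivial
    | cons d t' =>
      refine ⟨?_, ih (fun h => h1 (List.infix_cons h)) (fun h => h2 (List.infix_cons h))⟩
      rintro ⟨hc, hd | hd⟩
      · exact h1 (by subst hc; subst hd; exact ⟨[], t', rfl⟩)
      · exact h2 (by subst hc; subst hd; exact ⟨[], t', rfl⟩)

-- the encoding of a raw buffer as A's pipeline carries it (space → "::")
def pvEnc (c : Char) : List Char := if c = ' ' then [':', ':'] else [c]

theorem pvEnc_ne (c : Char) : pvEnc c ≠ [] := by
  unfold pvEnc; split <;> simp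

theorem pvEnc_flat_nil {l : List Char} : l.flatMap pvEnc = [] ↔ l = [] := by
  cases l with
  | nil => simp
  | cons c t =>
    simp only [List.flatMap_cons]
    constructor
    · intro h
      rcases List.append_eq_nil_iff.mp h with ⟨h1, _⟩
      exact absurd h1 (pvEnc_ne c)
    · intro h; simp at h

theorem pvDecG_cons_not_colon {c : Char} (h : c ≠ ':') (t : List Char) :
    pvDecG (c :: t) = c :: pvDecG t := by
  cases t with
  | nil => simp [pvDecG]
  | cons d t' => rw [pvDecG, if_neg (fun hc => h hc.1)]

theorem pvDecG_colon_not {t : List Char} (h : t.head? ≠ some ':') :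
    pvDecG (':' :: t) = ':' :: pvDecG t := by
  cases t with
  | nil => simp [pvDecG]
  | cons d t' => rw [pvDecG, if_neg (fun hc => h (by simp [hc.2]))]

-- decoding undoes the encoding on a buffer with no bad colon pair
theorem pvDecG_enc : ∀ (l : List Char), pvOK l → pvDecG (l.flatMap pvEnc) = l := by
  intro l
  induction l with
  | nil => simp [pvDecG]
  | cons c t ih =>
    intro hok
    by_cases hsp : c = ' '
    · subst hsp
      have : ((' ' : Char) :: t).flatMap pvEnc = ':' :: ':' :: t.flatMap pvEnc := by
        simp [pvEnc]
      rw [this]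
      cases ht : t.flatMap pvEnc with
      | nil =>
        rw [show pvDecG [':', ':'] = [' '] from by decide]
        simp [pvEnc_flat_nil.mp ht]
      | cons x r =>
        rw [show pvDecG (':' :: ':' :: x :: r) = ' ' :: pvDecG (x :: r) from by
          rw [pvDecG, if_pos ⟨rfl, rfl⟩]]
        rw [← ht, ih (pvOK_tail hok)]
    · by_cases hco : c = ':'
      · subst hco
        have henc : ((':' : Char) :: t).flatMap pvEnc = ':' :: t.flatMap pvEnc := by
          simp [pvEnc]
        rw [henc]
        cases t with
        | nil => simp [pvDecG]
        | cons d t' =>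
          have hd : d ≠ ':' ∧ d ≠ ' ' := by
            have := hok.1
            constructor <;> intro h <;> exact this ⟨rfl, by simp [h]⟩
          have hdenc : (d :: t').flatMap pvEnc = d :: t'.flatMap pvEnc := by
            simp [pvEnc, hd.2]
          rw [hdenc, pvDecG_colon_not (by simp [hd.1]), ← hdenc, ih (pvOK_tail hok)]
      · have : (c :: t).flatMap pvEnc = c :: t.flatMap pvEnc := by simp [pvEnc, hsp]
        rw [this, pvDecG_cons_not_colon hco, ih (pvOK_tail hok)]

theorem pvDec_enc {l : List Char} (h : pvOK l) : pvDec (l.flatMap pvEnc) = String.ofList l := by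
  rw [pvDec_eq_decG, pvDecG_enc l h]

theorem pvFlushB_eq (buf : List Char) (toks : List String) (h : pvOK buf) :
    pvFlushB buf toks =
      toks ++ (if buf.flatMap pvEnc = [] then [] else [pvDec (buf.flatMap pvEnc)]) := by
  by_cases hb : buf = []
  · simp [pvFlushB, hb]
  · rw [pvFlushB, if_neg hb, if_neg (fun hh => hb (pvEnc_flat_nil.mp hh)), pvDec_enc h]

-- main scan invariant: on colon-clean input B's loop computes A's split-then-decode
theorem pv_scanB_eq :
    ∀ (cs buf : List Char) (toks : List String), pvOK (buf ++ cs) →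
      pvScanB cs buf toks = toks ++ (pvSplitW (pvExpand cs) (buf.flatMap pvEnc)).map pvDec := by
  intro cs buf toks
  induction cs, buf, toks using pvScanB.induct with
  | case1 buf toks =>
    intro hok
    rw [pvScanB, pvFlushB_eq _ _ (by simpa using hok)]
    by_cases h : buf.flatMap pvEnc = [] <;> simp [pvExpand, pvSplitW, h]
  | case2 t buf toks ih =>
    intro hok
    have hokbuf : pvOK buf := pvOK_append_left _ _ hok
    rw [pvScanB.eq_2]
    have hex : pvExpand ('\\' :: '+' :: t) = ' ' :: '\\' :: '+' :: ' ' :: pvExpand t := by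
      rw [pvExpand, if_pos ⟨rfl, rfl⟩]
    rw [hex, pv_splitW_space (by decide), pv_splitW_nonspace (by decide),
      pv_splitW_nonspace (by decide), pv_splitW_space (by decide)]
    rw [ih (by
      have : buf ++ '\\' :: '+' :: t = (buf ++ ['\\', '+']) ++ t := by simp
      rw [this] at hok
      simpa using pvOK_suffix _ _ hok)]
    have hdec : pvDec ['\\', '+'] = "\\+" := by decide
    rw [pvFlushB_eq _ _ hokbuf]
    by_cases hb : buf.flatMap pvEnc = [] <;> simp [hb, hdec]
  | case3 c t buf toks h1 h2 ih =>
    intro hok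
    have hokbuf : pvOK buf := pvOK_append_left _ _ hok
    rw [pvScanB.eq_3 _ _ _ _ h1, if_pos h2]
    have hcbs : c ≠ '\\' := by rcases h2 with h | h | h <;> subst h <;> decide
    have he : pvE4 c = [' ', c, ' '] := by
      rcases h2 with h | h | h <;> subst h <;> decide
    rw [pvExpand_cons_not_bs hcbs, he, List.cons_append, List.cons_append,
      List.cons_append, List.nil_append, pv_splitW_space (by decide),
      pv_splitW_nonspace (by rcases h2 with h | h | h <;> subst h <;> decide),
      pv_splitW_space (by decide)]
    rw [ih (by
      have : buf ++ c :: t = (buf ++ [c]) ++ t := by simp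
      rw [this] at hok
      simpa using pvOK_suffix _ _ hok)]
    have hdec : pvDec [c] = String.ofList [c] := by
      rcases h2 with h | h | h <;> subst h <;> decide
    rw [pvFlushB_eq _ _ hokbuf]
    by_cases hb : buf.flatMap pvEnc = [] <;> simp [hb, hdec]
  | case4 c t buf toks h1 h2 h3 ih =>
    intro hok
    have hokbuf : pvOK buf := pvOK_append_left _ _ hok
    obtain ⟨hsp, hne⟩ := h3
    rw [pvScanB.eq_3 _ _ _ _ h1, if_neg h2, if_pos ⟨hsp, hne⟩]
    have hcbs : c ≠ '\\' := by intro h; subst h; simp [PySem.Chars.isspace] at hsp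
    have he : pvE4 c = [c] := by
      have n2 : c ≠ '(' := by intro h; subst h; simp [PySem.Chars.isspace] at hsp
      have n3 : c ≠ ')' := by intro h; subst h; simp [PySem.Chars.isspace] at hsp
      have n4 : c ≠ ',' := by intro h; subst h; simp [PySem.Chars.isspace] at hsp
      simp [pvE4, hne, n2, n3, n4]
    rw [pvExpand_cons_not_bs hcbs, he, List.singleton_append, pv_splitW_space hsp]
    rw [ih (by
      have : buf ++ c :: t = (buf ++ [c]) ++ t := by simp
      rw [this] at hok
      simpa using pvOK_suffix _ _ hok)]
    rw [pvFlushB_eq _ _ hokbuf]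
    by_cases hb : buf.flatMap pvEnc = [] <;> simp [hb]
  | case5 c t buf toks h1 h2 h3 ih =>
    intro hok
    have hok' : pvOK ((buf ++ [c]) ++ t) := by
      have : buf ++ c :: t = (buf ++ [c]) ++ t := by simp
      rwa [this] at hok
    rw [pvScanB.eq_3 _ _ _ _ h1, if_neg h2, if_neg h3]
    by_cases hsp : c = ' '
    · subst hsp
      rw [pvExpand_cons_not_bs (by decide), show pvE4 ' ' = [':', ':'] from by decide,
        List.cons_append, List.cons_append, List.nil_append,
        pv_splitW_nonspace (by decide), pv_splitW_nonspace (by decide)]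
      rw [ih hok']
      simp [pvEnc]
    · have hnsp : PySem.Chars.isspace c = false := by
        by_cases hs : PySem.Chars.isspace c = true
        · exact absurd ⟨hs, hsp⟩ h3
        · simpa using hs
      by_cases hc : c = '\\'
      · subst hc
        have hhp : t.head? ≠ some '+' := by
          intro hh
          cases t with
          | nil => simp at hh
          | cons d t' =>
            simp at hh
            exact h1 t' rfl (by rw [hh])
        rw [pvExpand_cons_bs_not_plus hhp, pv_splitW_nonspace hnsp]
        rw [ih hok']
        simp [pvEnc]
      · have he : pvE4 c = [c] := by
          have n2 : c ≠ '(' := fun h => h2 (Or.inl h)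
          have n3 : c ≠ ')' := fun h => h2 (Or.inr (Or.inl h))
          have n4 : c ≠ ',' := fun h => h2 (Or.inr (Or.inr h))
          simp [pvE4, hsp, n2, n3, n4]
        rw [pvExpand_cons_not_bs hc, he, List.singleton_append, pv_splitW_nonspace hnsp]
        rw [ih hok']
        simp [pvEnc, hsp]

theorem pv_flatMap_comp (f g : Char → List Char) (l : List Char) :
    (l.flatMap f).flatMap g = l.flatMap (fun c => (f c).flatMap g) := by
  induction l with
  | nil => simp
  | cons c t ih => simp [ih]

theorem pv_e4_eq (c : Char) :
    List.flatMap (fun c =>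
      List.flatMap (fun c =>
        List.flatMap (fun c => if c = ',' then [' ', ',', ' '] else [c])
          (if c = ')' then [' ', ')', ' '] else [c]))
        (if c = '(' then [' ', '(', ' '] else [c]))
      (if c = ' ' then [':', ':'] else [c]) = pvE4 c := by
  by_cases h1 : c = ' '
  · subst h1; decide
  by_cases h2 : c = '('
  · subst h2; decide
  by_cases h3 : c = ')'
  · subst h3; decide
  by_cases h4 : c = ','
  · subst h4; decide
  simp [pvE4, h1, h2, h3, h4]

theorem pvRepBP_cons_not_bs {c : Char} (h : c ≠ '\\') (t : List Char) :
    pvRepBP (c :: t) = c :: pvRepBP t := by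
  cases t with
  | nil => simp [pvRepBP]
  | cons d t' => rw [pvRepBP, if_neg (fun hc => h hc.1)]

theorem pvRepBP_cons_bs_not_plus {t : List Char} (h : t.head? ≠ some '+') :
    pvRepBP ('\\' :: t) = '\\' :: pvRepBP t := by
  cases t with
  | nil => simp [pvRepBP]
  | cons d t' => rw [pvRepBP, if_neg (fun hc => h (by simp [hc.2]))]

theorem pv_head_e4 {d : Char} (hd : d ≠ '+') (r : List Char) :
    (pvE4 d ++ r).head? ≠ some '+' := by
  by_cases h1 : d = ' '
  · simp [pvE4, h1]
  by_cases h2 : d = '('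
  · simp [pvE4, h1, h2]
  by_cases h3 : d = ')'
  · simp [pvE4, h1, h2, h3]
  by_cases h4 : d = ','
  · simp [pvE4, h1, h2, h3, h4]
  simp [pvE4, h1, h2, h3, h4, hd]

theorem pv_bp_flatMap : ∀ (cs : List Char), pvRepBP (cs.flatMap pvE4) = pvExpand cs := by
  intro cs
  induction cs using pvExpand.induct with
  | case1 => simp [pvRepBP, pvExpand]
  | case2 c =>
    by_cases h1 : c = ' '
    · subst h1; decide
    by_cases h2 : c = '('
    · subst h2; decide
    by_cases h3 : c = ')'
    · subst h3; decide
    by_cases h4 : c = ','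
    · subst h4; decide
    simp [pvE4, pvExpand, pvRepBP, h1, h2, h3, h4]
  | case3 c d t h ih =>
    obtain ⟨hc, hdp⟩ := h; subst hc; subst hdp
    have he : pvE4 '\\' = ['\\'] := by decide
    have hp : pvE4 '+' = ['+'] := by decide
    simp only [List.flatMap_cons, he, hp]
    rw [pvExpand, if_pos ⟨rfl, rfl⟩]
    show pvRepBP ('\\' :: '+' :: t.flatMap pvE4) = _
    rw [pvRepBP, if_pos ⟨rfl, rfl⟩, ih]
  | case4 c d t h ih =>
    have hrest : (d :: t).flatMap pvE4 = pvE4 d ++ t.flatMap pvE4 := by simp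
    rw [List.flatMap_cons]
    rw [pvExpand, if_neg h]
    by_cases hc : c = '\\'
    · subst hc
      have hd : d ≠ '+' := fun hh => h ⟨rfl, hh⟩
      have he : pvE4 '\\' = ['\\'] := by decide
      rw [he]
      show pvRepBP ('\\' :: (d :: t).flatMap pvE4) = _
      rw [pvRepBP_cons_bs_not_plus (by rw [hrest]; exact pv_head_e4 hd _), ih]
      simp
    · by_cases h1 : c = ' '
      · subst h1
        show pvRepBP ([':', ':'] ++ _) = [':', ':'] ++ _
        rw [List.cons_append, List.cons_append, List.nil_append,
          pvRepBP_cons_not_bs (by decide), pvRepBP_cons_not_bs (by decide), ih]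
        simp
      by_cases h2 : c = '('
      · subst h2
        show pvRepBP ([' ', '(', ' '] ++ _) = [' ', '(', ' '] ++ _
        rw [List.cons_append, List.cons_append, List.cons_append, List.nil_append,
          pvRepBP_cons_not_bs (by decide), pvRepBP_cons_not_bs (by decide),
          pvRepBP_cons_not_bs (by decide), ih]
        simp
      by_cases h3 : c = ')'
      · subst h3
        show pvRepBP ([' ', ')', ' '] ++ _) = [' ', ')', ' '] ++ _
        rw [List.cons_append, List.cons_append, List.cons_append, List.nil_append,
          pvRepBP_cons_not_bs (by decide), pvRepBP_cons_not_bs (by decide),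
          pvRepBP_cons_not_bs (by decide), ih]
        simp
      by_cases h4 : c = ','
      · subst h4
        show pvRepBP ([' ', ',', ' '] ++ _) = [' ', ',', ' '] ++ _
        rw [List.cons_append, List.cons_append, List.cons_append, List.nil_append,
          pvRepBP_cons_not_bs (by decide), pvRepBP_cons_not_bs (by decide),
          pvRepBP_cons_not_bs (by decide), ih]
        simp
      · have he : pvE4 c = [c] := by simp [pvE4, h1, h2, h3, h4]
        rw [he]
        show pvRepBP (c :: (d :: t).flatMap pvE4) = _
        rw [pvRepBP_cons_not_bs hc, ih]
        simp

theorem pv_norm_eq (cs : List Char) :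
    PySem.Chars.replace
      (PySem.Chars.replace
        (PySem.Chars.replace
          (PySem.Chars.replace
            (PySem.Chars.replace cs [' '] [':', ':'])
            ['('] [' ', '(', ' '])
          [')'] [' ', ')', ' '])
        [','] [' ', ',', ' '])
      ['\\', '+'] [' ', '\\', '+', ' '] = pvExpand cs := by
  have r1 : ∀ (l : List Char) (a : Char) (new : List Char),
      PySem.Chars.replace l [a] new = l.flatMap (fun c => if c = a then new else [c]) := by
    intro l a new
    rw [pv_replace_eq _ _ _ (by simp), pvRepF_single _ _ _ _ le_rfl]
  have rbp : ∀ (l : List Char),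
      PySem.Chars.replace l ['\\', '+'] [' ', '\\', '+', ' '] = pvRepBP l := by
    intro l
    rw [pv_replace_eq _ _ _ (by simp), pvRepF_bp _ _ le_rfl]
  rw [r1 cs ' ', r1 _ '(', r1 _ ')', r1 _ ',', rbp]
  simp only [pv_flatMap_comp]
  have he4 : (fun c =>
      List.flatMap (fun c =>
        List.flatMap (fun c =>
          List.flatMap (fun c => if c = ',' then [' ', ',', ' '] else [c])
            (if c = ')' then [' ', ')', ' '] else [c]))
          (if c = '(' then [' ', '(', ' '] else [c]))
        (if c = ' ' then [':', ':'] else [c])) = pvE4 := funext pv_e4_eq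
  rw [he4, pv_bp_flatMap]

theorem pvDec_token (l : List Char) :
    (if PySem.Str.isIn "::" (String.ofList l) then
        PySem.Str.replace (String.ofList l) "::" " "
      else String.ofList l) = pvDec l := by
  by_cases h : PySem.Str.isIn "::" (String.ofList l)
  · rw [if_pos h]
    simp [PySem.Str.replace, pvDec]
  · rw [if_neg h]
    have h' : PySem.Chars.isIn [':', ':'] l = false := by
      simpa [PySem.Str.isIn] using h
    have hinf := (PySem.Chars.isIn_eq_false_iff [':', ':'] l).mp h'
    simp [pvDec, pv_replace_eq l [':', ':'] [' '] (by simp),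
      pvRepF_id [':', ':'] [' '] (by simp) l.length l le_rfl hinf]

-- ===== chunk decomposition (for the tightness theorem) =====
def pvFlushC (buf : List Char) : List (List Char) := if buf = [] then [] else [buf]

def pvChunks : List Char → List Char → List (List Char)
  | [], buf => pvFlushC buf
  | '\\' :: '+' :: t, buf => pvFlushC buf ++ ['\\', '+'] :: pvChunks t []
  | c :: t, buf =>
    if c = '(' ∨ c = ')' ∨ c = ',' then pvFlushC buf ++ [c] :: pvChunks t []
    else if PySem.Chars.isspace c ∧ c ≠ ' ' then pvFlushC buf ++ pvChunks t []
    else pvChunks t (buf ++ [c])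

-- B's scan, in terms of the raw chunks
theorem pv_scanB_chunks :
    ∀ (cs buf : List Char) (toks : List String),
      pvScanB cs buf toks = toks ++ (pvChunks cs buf).map String.ofList := by
  intro cs buf toks
  induction cs, buf, toks using pvScanB.induct with
  | case1 buf toks =>
    rw [pvScanB, pvChunks]
    by_cases h : buf = [] <;> simp [pvFlushB, pvFlushC, h]
  | case2 t buf toks ih =>
    rw [pvScanB.eq_2, pvChunks.eq_2, ih]
    by_cases h : buf = [] <;> simp [pvFlushB, pvFlushC, h]
  | case3 c t buf toks h1 h2 ih =>
    rw [pvScanB.eq_3 _ _ _ _ h1, if_pos h2, pvChunks.eq_3 _ _ _ h1, if_pos h2, ih]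
    by_cases h : buf = [] <;> simp [pvFlushB, pvFlushC, h]
  | case4 c t buf toks h1 h2 h3 ih =>
    rw [pvScanB.eq_3 _ _ _ _ h1, if_neg h2, if_pos h3, pvChunks.eq_3 _ _ _ h1, if_neg h2,
      if_pos h3, ih]
    by_cases h : buf = [] <;> simp [pvFlushB, pvFlushC, h]
  | case5 c t buf toks h1 h2 h3 ih =>
    rw [pvScanB.eq_3 _ _ _ _ h1, if_neg h2, if_neg h3, pvChunks.eq_3 _ _ _ h1, if_neg h2,
      if_neg h3, ih]

-- A's split of the expanded string is the encoding of the same chunks (no pvOK needed)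
theorem pv_splitW_chunks :
    ∀ (cs buf : List Char),
      pvSplitW (pvExpand cs) (buf.flatMap pvEnc) =
        (pvChunks cs buf).map (fun l => l.flatMap pvEnc) := by
  intro cs buf
  induction cs, buf using pvChunks.induct with
  | case1 buf =>
    rw [pvChunks]
    by_cases h : buf = []
    · simp [pvExpand, pvSplitW, pvFlushC, h]
    · have hne : buf.flatMap pvEnc ≠ [] := fun hh => h (pvEnc_flat_nil.mp hh)
      simp [pvExpand, pvSplitW, pvFlushC, h, hne]
  | case2 t buf ih =>
    rw [pvChunks.eq_2]
    have hex : pvExpand ('\\' :: '+' :: t) = ' ' :: '\\' :: '+' :: ' ' :: pvExpand t := by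
      rw [pvExpand, if_pos ⟨rfl, rfl⟩]
    rw [hex, pv_splitW_space (by decide), pv_splitW_nonspace (by decide),
      pv_splitW_nonspace (by decide), pv_splitW_space (by decide)]
    simp only [List.flatMap_nil] at ih
    rw [ih]
    by_cases h : buf = []
    · simp [pvFlushC, h, pvEnc]
    · have hne : buf.flatMap pvEnc ≠ [] := fun hh => h (pvEnc_flat_nil.mp hh)
      simp [pvFlushC, h, hne, pvEnc]
  | case3 c t buf h1 h2 ih =>
    rw [pvChunks.eq_3 _ _ _ h1, if_pos h2]
    have hcbs : c ≠ '\\' := by rcases h2 with h | h | h <;> subst h <;> decide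
    have he : pvE4 c = [' ', c, ' '] := by
      rcases h2 with h | h | h <;> subst h <;> decide
    rw [pvExpand_cons_not_bs hcbs, he, List.cons_append, List.cons_append,
      List.cons_append, List.nil_append, pv_splitW_space (by decide),
      pv_splitW_nonspace (by rcases h2 with h | h | h <;> subst h <;> decide),
      pv_splitW_space (by decide)]
    simp only [List.flatMap_nil] at ih
    rw [ih]
    have hc' : [c].flatMap pvEnc = [c] := by
      rcases h2 with h | h | h <;> subst h <;> decide
    by_cases h : buf = []
    · simp [pvFlushC, h, hc']
    · have hne : buf.flatMap pvEnc ≠ [] := fun hh => h (pvEnc_flat_nil.mp hh)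
      simp [pvFlushC, h, hne, hc']
  | case4 c t buf h1 h2 h3 ih =>
    rw [pvChunks.eq_3 _ _ _ h1, if_neg h2, if_pos h3]
    obtain ⟨hsp, hne⟩ := h3
    have hcbs : c ≠ '\\' := by intro h; subst h; simp [PySem.Chars.isspace] at hsp
    have he : pvE4 c = [c] := by
      have n2 : c ≠ '(' := by intro h; subst h; simp [PySem.Chars.isspace] at hsp
      have n3 : c ≠ ')' := by intro h; subst h; simp [PySem.Chars.isspace] at hsp
      have n4 : c ≠ ',' := by intro h; subst h; simp [PySem.Chars.isspace] at hsp
      simp [pvE4, hne, n2, n3, n4]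
    rw [pvExpand_cons_not_bs hcbs, he, List.singleton_append, pv_splitW_space hsp]
    simp only [List.flatMap_nil] at ih
    rw [ih]
    by_cases h : buf = []
    · simp [pvFlushC, h]
    · have hne : buf.flatMap pvEnc ≠ [] := fun hh => h (pvEnc_flat_nil.mp hh)
      simp [pvFlushC, h, hne]
  | case5 c t buf h1 h2 h3 ih =>
    rw [pvChunks.eq_3 _ _ _ h1, if_neg h2, if_neg h3]
    by_cases hsp : c = ' '
    · subst hsp
      rw [pvExpand_cons_not_bs (by decide), show pvE4 ' ' = [':', ':'] from by decide,
        List.cons_append, List.cons_append, List.nil_append,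
        pv_splitW_nonspace (by decide), pv_splitW_nonspace (by decide)]
      rw [show (List.flatMap pvEnc buf) ++ [':'] ++ [':'] = (buf ++ [' ']).flatMap pvEnc from by
        simp [pvEnc]]
      exact ih
    · have hnsp : PySem.Chars.isspace c = false := by
        by_cases hs : PySem.Chars.isspace c = true
        · exact absurd ⟨hs, hsp⟩ h3
        · simpa using hs
      by_cases hc : c = '\\'
      · subst hc
        have hhp : t.head? ≠ some '+' := by
          intro hh
          cases t with
          | nil => simp at hh
          | cons d t' =>
            simp at hh
            exact h1 t' rfl (by rw [hh])
        rw [pvExpand_cons_bs_not_plus hhp, pv_splitW_nonspace hnsp]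
        rw [show (List.flatMap pvEnc buf) ++ ['\\'] = (buf ++ ['\\']).flatMap pvEnc from by
          simp [pvEnc]]
        exact ih
      · have he : pvE4 c = [c] := by
          have n2 : c ≠ '(' := fun h => h2 (Or.inl h)
          have n3 : c ≠ ')' := fun h => h2 (Or.inr (Or.inl h))
          have n4 : c ≠ ',' := fun h => h2 (Or.inr (Or.inr h))
          simp [pvE4, hsp, n2, n3, n4]
        rw [pvExpand_cons_not_bs hc, he, List.singleton_append, pv_splitW_nonspace hnsp]
        rw [show (List.flatMap pvEnc buf) ++ [c] = (buf ++ [c]).flatMap pvEnc from by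
          simp [pvEnc, hsp]]
        exact ih

-- gluing pvOK across an append whose boundary pair is not bad
theorem pvOK_glue :
    ∀ (l1 l2 : List Char), pvOK l1 → pvOK l2 →
      (∀ a b, l1.getLast? = some a → l2.head? = some b → ¬(a = ':' ∧ (b = ':' ∨ b = ' '))) →
      pvOK (l1 ++ l2) := by
  intro l1
  induction l1 with
  | nil => intro l2 _ h2 _; simpa using h2
  | cons a t ih =>
    intro l2 h1 h2 hb
    cases t with
    | nil =>
      cases l2 with
      | nil => trivial
      | cons b l2' =>
        exact ⟨hb a b rfl rfl, h2⟩
    | cons c t' =>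
      refine ⟨h1.1, ?_⟩
      exact ih l2 h1.2 h2 (fun x y hx hy => hb x y (by
        rw [List.getLast?_cons_cons]; exact hx) hy)

-- if every chunk is colon-clean then so is the whole input
theorem pvOK_of_chunks :
    ∀ (cs buf : List Char), (∀ l ∈ pvChunks cs buf, pvOK l) → pvOK (buf ++ cs) := by
  intro cs buf
  induction cs, buf using pvChunks.induct with
  | case1 buf =>
    intro h
    simp only [List.append_nil]
    by_cases hb : buf = []
    · subst hb; trivial
    · exact h buf (by simp [pvChunks, pvFlushC, hb])
  | case2 t buf ih =>
    intro h
    have hbuf : pvOK buf := by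
      by_cases hb : buf = []
      · subst hb; trivial
      · exact h buf (by simp [pvChunks.eq_2, pvFlushC, hb])
    have ht : pvOK t := by
      have := ih (fun l hl => h l (by simp [pvChunks.eq_2]; right; right; simpa using hl))
      simpa using this
    apply pvOK_glue buf _ hbuf
    · exact pvOK_glue ['\\', '+'] t (by exact ⟨by simp, trivial⟩) ht
        (by intro a b ha hb'; simp at ha; subst ha; simp)
    · intro a b _ hb'
      cases t with
      | nil => simp at hb'; subst hb'; simp
      | cons x t' => simp at hb'; subst hb'; simp
  | case3 c t buf h1 h2 ih =>
    intro h
    have hbuf : pvOK buf := by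
      by_cases hb : buf = []
      · subst hb; trivial
      · exact h buf (by rw [pvChunks.eq_3 _ _ _ h1, if_pos h2]; simp [pvFlushC, hb])
    have ht : pvOK t := by
      have := ih (fun l hl => h l (by
        rw [pvChunks.eq_3 _ _ _ h1, if_pos h2]; simp; right; right; simpa using hl))
      simpa using this
    have hcne : c ≠ ':' := by rcases h2 with h' | h' | h' <;> subst h' <;> decide
    have hcsp : c ≠ ' ' := by rcases h2 with h' | h' | h' <;> subst h' <;> decide
    apply pvOK_glue buf _ hbuf
    · exact pvOK_glue [c] t trivial ht
        (by intro a b ha hb'; simp at ha; subst ha; simp [hcne])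
    · intro a b _ hb'
      simp at hb'; subst hb'; simp [hcne, hcsp]
  | case4 c t buf h1 h2 h3 ih =>
    intro h
    have hbuf : pvOK buf := by
      by_cases hb : buf = []
      · subst hb; trivial
      · exact h buf (by
          rw [pvChunks.eq_3 _ _ _ h1, if_neg h2, if_pos h3]; simp [pvFlushC, hb])
    have ht : pvOK t := by
      have := ih (fun l hl => h l (by
        rw [pvChunks.eq_3 _ _ _ h1, if_neg h2, if_pos h3]; simp; right; simpa using hl))
      simpa using this
    have hcne : c ≠ ':' := by
      intro hc; subst hc
      exact absurd h3.1 (by decide)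
    apply pvOK_glue buf _ hbuf
    · exact pvOK_glue [c] t trivial ht
        (by intro a b ha hb'; simp at ha; subst ha; simp [hcne])
    · intro a b _ hb'
      simp at hb'; subst hb'; simp [hcne, h3.2]
  | case5 c t buf h1 h2 h3 ih =>
    intro h
    have := ih (fun l hl => h l (by
      rw [pvChunks.eq_3 _ _ _ h1, if_neg h2, if_neg h3]; exact hl))
    simpa using this

-- the decode of the encode of a chunk with a bad colon pair never gives the chunk back
theorem pvDecG_pair (X : List Char) : pvDecG (':' :: ':' :: X) = ' ' :: pvDecG X := by
  rw [pvDecG, if_pos ⟨rfl, rfl⟩]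

theorem pvDecG_enc_ne : ∀ (l : List Char), ¬ pvOK l → pvDecG (l.flatMap pvEnc) ≠ l := by
  intro l
  induction l with
  | nil => intro h; exact absurd trivial h
  | cons c r ih =>
    intro hbad
    cases r with
    | nil => exact absurd trivial hbad
    | cons d r' =>
      by_cases hb : c = ':' ∧ (d = ':' ∨ d = ' ')
      · obtain ⟨hc, hd⟩ := hb; subst hc
        rcases hd with hd | hd <;> subst hd
        · rw [show ((':' :: ':' :: r').flatMap pvEnc) = ':' :: ':' :: r'.flatMap pvEnc from by
            simp [pvEnc], pvDecG_pair]
          simp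
        · rw [show ((':' :: ' ' :: r').flatMap pvEnc) = ':' :: ':' :: ':' :: r'.flatMap pvEnc
              from by simp [pvEnc], pvDecG_pair]
          simp
      · have h2 : ¬ pvOK (d :: r') := fun hok => hbad ⟨hb, hok⟩
        have step : pvDecG ((c :: d :: r').flatMap pvEnc) =
            c :: pvDecG ((d :: r').flatMap pvEnc) := by
          by_cases hsp : c = ' '
          · subst hsp
            rw [show ((' ' :: d :: r').flatMap pvEnc) = ':' :: ':' :: (d :: r').flatMap pvEnc
                from by simp [pvEnc], pvDecG_pair]
          · by_cases hco : c = ':'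
            · subst hco
              have hd : d ≠ ':' ∧ d ≠ ' ' := by
                constructor <;> intro h' <;> exact hb ⟨rfl, by simp [h']⟩
              have hdenc : (d :: r').flatMap pvEnc = d :: r'.flatMap pvEnc := by
                simp [pvEnc, hd.2]
              rw [show ((':' :: d :: r').flatMap pvEnc) = ':' :: (d :: r').flatMap pvEnc from by
                simp [pvEnc], hdenc, pvDecG_colon_not (by simp [hd.1]), ← hdenc]
            · rw [show ((c :: d :: r').flatMap pvEnc) = c :: (d :: r').flatMap pvEnc from by
                simp [pvEnc, hsp], pvDecG_cons_not_colon hco]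
        rw [step]
        intro heq
        exact ih h2 (List.cons.injEq .. ▸ heq |>.2)

theorem pv_not_pvOK_of_infix {x : Char} (hx : x = ':' ∨ x = ' ') :
    ∀ (l : List Char), [':', x] <:+: l → ¬ pvOK l := by
  intro l hinf hok
  obtain ⟨u, v, huv⟩ := hinf
  subst huv
  have hok' : pvOK (u ++ ([':', x] ++ v)) := by simpa [List.append_assoc] using hok
  have := pvOK_suffix u _ hok'
  exact this.1 ⟨rfl, by rcases hx with h | h <;> subst h <;> simp⟩

theorem pvOfList_inj {a b : List Char} (h : String.ofList a = String.ofList b) : a = b := by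
  have := congrArg String.toList h
  simpa using this

-- A's pipeline, reduced to split-then-decode of the expanded character list
theorem pv_A_char (s : String) :
    tokenize_prolog s = (pvSplitW (pvExpand s.toList) []).map pvDec := by
  unfold tokenize_prolog
  simp only [List.foldl, PySem.Str.split₀]
  have hnorm :
      (PySem.Str.replace (PySem.Str.replace (PySem.Str.replace (PySem.Str.replace
        (PySem.Str.replace s " " "::") "(" " ( ") ")" " ) ") "," " , ") "\\+" " \\+ ").toList
        = pvExpand s.toList := by
    simp only [PySem.Str.toList_replace]
    have := pv_norm_eq s.toList
    convert this using 2 <;> rfl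
  rw [hnorm, pv_split₀_eq]
  rw [List.map_map]
  apply List.map_congr_left
  intro l _
  simpa using pvDec_token l

-- ===== VERDICT (by name: the statements are the Claim_ definitions above) =====
theorem tokenize_prolog_spec : Claim_unchanged_tokenize_prolog := by
  intro s _
  unfold Spec_tokenize_prolog
  intro hnd
  unfold D_tokenize_prolog at hnd
  push_neg at hnd
  obtain ⟨h1, h2⟩ := hnd
  have hok : pvOK s.toList := by
    apply pvOK_of_not_infix
    · exact (PySem.Chars.isIn_eq_false_iff _ _).mp (by
        simpa [PySem.Str.isIn] using h1)
    · exact (PySem.Chars.isIn_eq_false_iff _ _).mp (by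
        simpa [PySem.Str.isIn] using h2)
  rw [pv_A_char]
  unfold tokenize_prolog_alt
  rw [pv_scanB_eq s.toList [] [] (by simpa using hok)]
  simp

theorem tokenize_prolog_changed : Claim_changed_tokenize_prolog := by
  unfold Claim_changed_tokenize_prolog; decide

theorem tokenize_prolog_tight : Claim_exact_tokenize_prolog := by
  intro s _ hD
  have hnok : ¬ pvOK s.toList := by
    unfold D_tokenize_prolog at hD
    rcases hD with h | h
    · have h' : PySem.Chars.isIn [':', ':'] s.toList = true := by
        simpa [PySem.Str.isIn] using h
      exact pv_not_pvOK_of_infix (Or.inl rfl) s.toList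
        ((PySem.Chars.isIn_iff_infix _ _).mp h')
    · have h' : PySem.Chars.isIn [':', ' '] s.toList = true := by
        simpa [PySem.Str.isIn] using h
      exact pv_not_pvOK_of_infix (Or.inr rfl) s.toList
        ((PySem.Chars.isIn_iff_infix _ _).mp h')
  have hch : ¬ ∀ l ∈ pvChunks s.toList [], pvOK l := by
    intro h
    exact hnok (by simpa using pvOK_of_chunks s.toList [] h)
  rw [not_forall] at hch
  obtain ⟨l, hl⟩ := hch
  rw [Classical.not_imp] at hl
  obtain ⟨hmem, hlnot⟩ := hl
  rw [pv_A_char]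
  have hB : tokenize_prolog_alt s = (pvChunks s.toList []).map String.ofList := by
    unfold tokenize_prolog_alt
    rw [pv_scanB_chunks]
    simp
  rw [hB]
  have hsplit : pvSplitW (pvExpand s.toList) [] =
      (pvChunks s.toList []).map (fun l => l.flatMap pvEnc) := by
    simpa using pv_splitW_chunks s.toList []
  rw [hsplit, List.map_map]
  intro heq
  have hpt := List.map_inj_left.mp heq l hmem
  simp only [Function.comp] at hpt
  rw [pvDec_eq_decG] at hpt
  exact pvDecG_enc_ne l hlnot (pvOfList_inj hpt)
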